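-- pv_equiv track=rewrite | github.com/T-Python-June-24/LAB_RECURSION_LAMBDA | vowels.py | vowelsIn
-- ===== SOURCE A (Python) =====
-- def vowelsIn(word):
--     vowels = ['a', 'e', 'i', 'o', 'u']
--     if word == '':
--         return ''
--     elif word[0].lower() in vowels and word != '':
--         return word[0] + vowelsIn(word[1:])
--     else:
--         return vowelsIn(word[1:])
-- ===== SOURCE B (Python) =====
-- def vowelsIn(word):
--     vowels = 'aeiou'
--     result = ''
--     for c in word:
--         if c.lower() in vowels:
--             result += c
--     return result
-- ===== Notes on version B (the rewrite author's own statement) =====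
-- stated objective: faster
-- what changed: Replaced A's recursion that rebuilds a slice word[1:] at every step with a single explicit for-loop over the characters accumulating the vowels.
import Mathlib
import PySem

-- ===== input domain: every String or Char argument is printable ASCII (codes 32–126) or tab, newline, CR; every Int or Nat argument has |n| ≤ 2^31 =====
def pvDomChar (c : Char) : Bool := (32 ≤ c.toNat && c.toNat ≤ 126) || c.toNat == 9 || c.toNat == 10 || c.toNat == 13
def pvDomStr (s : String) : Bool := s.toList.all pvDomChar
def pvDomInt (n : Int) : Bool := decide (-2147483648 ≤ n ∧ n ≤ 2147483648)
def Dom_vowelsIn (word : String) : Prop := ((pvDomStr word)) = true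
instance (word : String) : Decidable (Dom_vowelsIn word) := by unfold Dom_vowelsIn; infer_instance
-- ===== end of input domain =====

-- B iterates once with an accumulator instead of A's recursion on slices; same return value.

-- ===== PORT A =====
-- A's recursion on word[1:]; word[0].lower() is Char.toLower (exact on ASCII).
def vowelsInGo : List Char → List Char
  | [] => []
  | c :: rest =>
    if c.toLower ∈ ['a', 'e', 'i', 'o', 'u'] then c :: vowelsInGo rest
    else vowelsInGo rest

def vowelsIn (word : String) : String := String.ofList (vowelsInGo word.toList)

-- ===== PORT B =====
-- explicit loop with a running accumulator (fold over the characters)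
def vowelsIn_alt (word : String) : String :=
  String.ofList (word.toList.foldl
    (fun acc c => if c.toLower ∈ ['a', 'e', 'i', 'o', 'u'] then acc ++ [c] else acc) [])

-- ===== PRECONDITION & SPEC =====
def Spec_vowelsIn (word : String) (out : String) : Prop := out = vowelsIn_alt word
instance (word : String) (out : String) : Decidable (Spec_vowelsIn word out) := by unfold Spec_vowelsIn; infer_instance

-- ===== CLAIM (what is proved, stated in full; the proofs are below) =====
def Claim_equal_vowelsIn : Prop := ∀ (word : String), Dom_vowelsIn word → Spec_vowelsIn word (vowelsIn word)

-- ===== LEMMAS AND PROOFS =====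
theorem vowelsIn_fold_acc (l : List Char) (acc : List Char) :
    l.foldl (fun acc c => if c.toLower ∈ ['a', 'e', 'i', 'o', 'u'] then acc ++ [c] else acc) acc
      = acc ++ vowelsInGo l := by
  induction l generalizing acc with
  | nil => simp [vowelsInGo]
  | cons c rest ih =>
    simp only [List.foldl, vowelsInGo]
    by_cases h : c.toLower ∈ ['a', 'e', 'i', 'o', 'u']
    · rw [if_pos h, if_pos h, ih]; simp
    · rw [if_neg h, if_neg h, ih]

-- ===== VERDICT (by name: the statement is the Claim_ definition above) =====
theorem vowelsIn_spec : Claim_equal_vowelsIn := by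
  intro word _
  unfold Spec_vowelsIn vowelsIn vowelsIn_alt
  rw [vowelsIn_fold_acc]
  simp
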